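-- pv_equiv track=rewrite | github.com/zerabruck/Competitive-programming | A2sv/check_strict_super_set.py | super_set_checker
-- ===== SOURCE A (Python) =====
-- def super_set_checker(bigger_set,smaller_set):
--     for i in smaller_set:
--         if(i not in bigger_set):
--             return 'False'
--
--     for i in bigger_set:
--         if(i not in smaller_set):
--             return 'True'
--
--     return 'False'
-- ===== SOURCE B (Python) =====
-- def super_set_checker(bigger_set, smaller_set):
--     return 'True' if set(bigger_set) > set(smaller_set) else 'False'
-- ===== Notes on version B (the rewrite author's own statement) =====
-- stated objective: simpler
-- what changed: Replaces the two early-return membership-scanning loops with a single set-algebra expression: build both sets once and test proper superset with Python's > operator.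
import Mathlib
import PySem

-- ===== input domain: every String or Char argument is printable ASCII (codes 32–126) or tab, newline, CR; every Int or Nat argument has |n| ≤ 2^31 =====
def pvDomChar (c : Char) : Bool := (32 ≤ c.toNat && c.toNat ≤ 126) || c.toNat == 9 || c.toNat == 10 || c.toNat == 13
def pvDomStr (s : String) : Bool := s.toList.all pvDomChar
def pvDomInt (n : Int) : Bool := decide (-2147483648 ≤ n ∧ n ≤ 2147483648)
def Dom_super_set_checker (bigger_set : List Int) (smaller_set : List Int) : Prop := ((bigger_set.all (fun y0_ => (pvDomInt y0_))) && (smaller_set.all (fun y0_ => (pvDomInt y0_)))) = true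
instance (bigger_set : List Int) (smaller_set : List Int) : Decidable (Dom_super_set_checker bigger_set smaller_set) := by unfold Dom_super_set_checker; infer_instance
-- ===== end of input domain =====

-- B replaces A's two early-return membership-scanning loops by one set-algebra test (proper superset); simpler.


-- ===== PORT A =====
-- second loop of A: 'for i in bigger_set: if i not in smaller_set: return "True"'; then 'return "False"'
def superA_loop2 (smaller_set : List Int) : List Int → String
  | [] => "False"
  | i :: rest => if ¬ (i ∈ smaller_set) then "True" else superA_loop2 smaller_set rest

-- first loop of A: 'for i in smaller_set: if i not in bigger_set: return "False"', then the second loop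
def superA_go (bigger_set : List Int) (smaller_set : List Int) : List Int → String
  | [] => superA_loop2 smaller_set bigger_set
  | i :: rest => if ¬ (i ∈ bigger_set) then "False" else superA_go bigger_set smaller_set rest

def super_set_checker (bigger_set : List Int) (smaller_set : List Int) : String :=
  superA_go bigger_set smaller_set smaller_set

-- ===== PORT B =====
def super_set_checker_alt (bigger_set : List Int) (smaller_set : List Int) : String :=
  -- Python 'set(bigger_set) > set(smaller_set)' (proper superset) = smaller ⊆ bigger ∧ sets unequal
  if PySem.Set.issubset (PySem.Set.ofList smaller_set) (PySem.Set.ofList bigger_set) &&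
     !(PySem.Set.equal (PySem.Set.ofList smaller_set) (PySem.Set.ofList bigger_set)) then "True" else "False"

-- ===== PRECONDITION & SPEC =====
def Spec_super_set_checker (bigger_set : List Int) (smaller_set : List Int) (out : String) : Prop := out = super_set_checker_alt bigger_set smaller_set
instance (bigger_set : List Int) (smaller_set : List Int) (out : String) : Decidable (Spec_super_set_checker bigger_set smaller_set out) := by unfold Spec_super_set_checker; infer_instance

-- ===== CLAIM (what is proved, stated in full; the proofs are below) =====
def Claim_equal_super_set_checker : Prop := ∀ (bigger_set : List Int) (smaller_set : List Int), Dom_super_set_checker bigger_set smaller_set → Spec_super_set_checker bigger_set smaller_set (super_set_checker bigger_set smaller_set)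

-- ===== LEMMAS AND PROOFS =====
theorem superA_loop2_eq (s : List Int) (b : List Int) :
    superA_loop2 s b = if ∃ i ∈ b, i ∉ s then "True" else "False" := by
  induction b with
  | nil => simp [superA_loop2]
  | cons i rest ih =>
    by_cases h : i ∈ s
    · simp [superA_loop2, h, ih]
    · simp [superA_loop2, h]

theorem superA_go_eq (b : List Int) (s0 : List Int) (s : List Int) :
    superA_go b s0 s = if ∀ i ∈ s, i ∈ b then superA_loop2 s0 b else "False" := by
  induction s with
  | nil => simp [superA_go]
  | cons i rest ih =>
    by_cases h : i ∈ b
    · simpa [superA_go, h] using ih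
    · simp [superA_go, h]

theorem super_set_checker_spec : Claim_equal_super_set_checker := by
  intro b s _
  unfold Spec_super_set_checker super_set_checker super_set_checker_alt
  rw [superA_go_eq, superA_loop2_eq]
  have hss : (PySem.Set.ofList s).issubset (PySem.Set.ofList b) = true ↔ ∀ i ∈ s, i ∈ b := by
    simp [PySem.Set.issubset_iff, PySem.Set.mem_ofList]
  have heq : (PySem.Set.ofList s).equal (PySem.Set.ofList b) = true ↔ ∀ x, x ∈ s ↔ x ∈ b := by
    simp [PySem.Set.equal_iff, PySem.Set.mem_ofList]
  by_cases hsub : ∀ i ∈ s, i ∈ b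
  · by_cases hex : ∃ i ∈ b, i ∉ s
    · have h2 : (PySem.Set.ofList s).equal (PySem.Set.ofList b) = false := by
        rw [Bool.eq_false_iff]
        rw [Ne, heq]
        intro h
        obtain ⟨x, hxb, hxs⟩ := hex
        exact hxs ((h x).mpr hxb)
      rw [if_pos hsub, if_pos hex, if_pos (by simp [hss.mpr hsub, h2])]
    · have h2 : (PySem.Set.ofList s).equal (PySem.Set.ofList b) = true := by
        rw [heq]
        intro x
        refine ⟨fun hx => hsub x hx, fun hx => ?_⟩
        by_contra hxs
        exact hex ⟨x, hx, hxs⟩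
      rw [if_pos hsub, if_neg hex, if_neg (by simp [h2])]
  · have h1 : (PySem.Set.ofList s).issubset (PySem.Set.ofList b) = false := by
      rw [Bool.eq_false_iff, Ne, hss]
      exact hsub
    rw [if_neg hsub, if_neg (by simp [h1])]
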